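-- pv_equiv track=rewrite | github.com/AFCgooner29/Coding-Ninjas-Competetive-Programming-code | Language_tools/differn_names.py | differentNames
-- ===== SOURCE A (Python) =====
-- def differentNames(names,flag):
--     freq={}
--     for i in names:
--         if(i in freq.keys()):
--             freq[i]+=1
--             flag=True
--         else:
--             freq[i]=1
--     return freq,flag
-- ===== SOURCE B (Python) =====
-- def differentNames(names, flag):
--     distinct = list(dict.fromkeys(names))
--     freq = {n: names.count(n) for n in distinct}
--     if len(distinct) < len(names):
--         flag = True
--     return freq, flag
-- ===== Notes on version B (the rewrite author's own statement) =====
-- stated objective: alternative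
-- what changed: Replaces A's single incremental pass (membership branch, +=1, inline flag) by two staged passes: first the ordered list of distinct names via dict.fromkeys, then a dict comprehension filling each key with names.count(n) (a full scan per distinct key), with the duplicate flag derived from comparing the number of distinct names to the list length.
import Mathlib
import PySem

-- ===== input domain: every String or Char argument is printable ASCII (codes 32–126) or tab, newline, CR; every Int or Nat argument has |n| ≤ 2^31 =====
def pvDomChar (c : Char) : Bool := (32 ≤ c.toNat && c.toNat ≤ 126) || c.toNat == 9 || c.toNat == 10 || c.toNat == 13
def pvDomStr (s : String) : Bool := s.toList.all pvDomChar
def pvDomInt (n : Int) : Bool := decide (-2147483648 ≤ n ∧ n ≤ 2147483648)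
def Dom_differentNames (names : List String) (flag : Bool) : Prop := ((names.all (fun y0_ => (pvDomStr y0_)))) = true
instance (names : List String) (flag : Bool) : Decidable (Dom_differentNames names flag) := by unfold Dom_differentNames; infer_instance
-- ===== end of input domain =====

-- B is a staged alternative: it lists the distinct names first (dict.fromkeys), fills each key by a
-- full-list count, and derives the duplicate flag from a size comparison, instead of A's single
-- incremental pass with an inline flag; same result, different algorithm (not faster).

-- ===== PORT A =====
def differentNamesLoop : List String → PySem.Dict String Int → Bool → PySem.Dict String Int × Bool
  | [], freq, flag => (freq, flag)
  | i :: rest, freq, flag =>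
    if freq.contains i then
      differentNamesLoop rest (freq.insert i (freq.getD i 0 + 1)) true
    else
      differentNamesLoop rest (freq.insert i 1) flag

def differentNames (names : List String) (flag : Bool) : (List (String × Int)) × Bool :=
  let r := differentNamesLoop names PySem.Dict.empty flag
  (r.1.items, r.2)

-- ===== PORT B =====
def differentNames_alt (names : List String) (flag : Bool) : (List (String × Int)) × Bool :=
  let distinct := PySem.List.dedup names
  let freq := distinct.foldl (fun d n => d.insert n ((names.count n : Int))) PySem.Dict.empty
  let flag' := if distinct.length < names.length then true else flag
  (freq.items, flag')

-- ===== PRECONDITION & SPEC =====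
def Spec_differentNames (names : List String) (flag : Bool) (out : (List (String × Int)) × Bool) : Prop := out = differentNames_alt names flag
instance (names : List String) (flag : Bool) (out : (List (String × Int)) × Bool) : Decidable (Spec_differentNames names flag out) := by unfold Spec_differentNames; infer_instance

-- ===== CLAIM (what is proved, stated in full; the proofs are below) =====
def Claim_equal_differentNames : Prop := ∀ (names : List String) (flag : Bool), Dom_differentNames names flag → Spec_differentNames names flag (differentNames names flag)

-- ===== LEMMAS AND PROOFS =====

-- The dict built by A's loop is the plain counting fold (both branches insert getD+1).
theorem loop_fst (xs : List String) (d : PySem.Dict String Int) (f : Bool) :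
    (differentNamesLoop xs d f).1 = xs.foldl (fun d x => d.insert x (d.getD x 0 + 1)) d := by
  induction xs generalizing d f with
  | nil => rfl
  | cons x rest ih =>
    simp only [differentNamesLoop, List.foldl]
    by_cases h : d.contains x = true
    · rw [if_pos h, ih]
    · rw [if_neg h, ih]
      have h0 : d.getD x 0 = 0 := PySem.Dict.getD_of_not_contains _ _ (by simpa using h)
      rw [h0]
      norm_num

-- A's final flag is the incoming flag OR-ed with "keys-so-far ++ rest has a duplicate".
theorem loop_snd (xs : List String) (d : PySem.Dict String Int) (f : Bool)
    (hnd : d.keys.Nodup) :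
    (differentNamesLoop xs d f).2 = (f || !decide ((d.keys ++ xs).Nodup)) := by
  induction xs generalizing d f with
  | nil => simp [differentNamesLoop, hnd]
  | cons x rest ih =>
    simp only [differentNamesLoop]
    by_cases h : d.contains x = true
    · rw [if_pos h]
      have hx : x ∈ d.keys := (PySem.Dict.contains_iff_mem_keys _ _).mp h
      have hkeys : (d.insert x (d.getD x 0 + 1)).keys = d.keys :=
        PySem.Dict.keys_insert_of_contains _ _ h
      rw [ih _ _ (hkeys ▸ hnd)]
      have : ¬ (d.keys ++ x :: rest).Nodup := by
        intro hcon
        exact (List.disjoint_of_nodup_append hcon) hx (List.mem_cons_self)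
      simp [this]
    · rw [if_neg h]
      have hx : x ∉ d.keys := fun hm => h ((PySem.Dict.contains_iff_mem_keys _ _).mpr hm)
      have hkeys : (d.insert x 1).keys = d.keys ++ [x] :=
        PySem.Dict.keys_insert_of_not_contains _ _ (by simpa using h)
      have hnd' : (d.insert x 1).keys.Nodup := by
        rw [hkeys]
        rw [List.nodup_append]
        refine ⟨hnd, List.nodup_singleton x, ?_⟩
        intro a ha b hb
        rw [List.mem_singleton] at hb
        subst hb
        exact fun he => hx (he ▸ ha)
      rw [ih _ _ hnd', hkeys]
      simp only [List.append_assoc, List.singleton_append]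

-- set(xs) has as many elements as xs exactly when xs has no duplicates.
theorem length_ofList_eq_iff (xs : List String) :
    (PySem.Set.ofList xs).length = xs.length ↔ xs.Nodup := by
  induction xs using List.reverseRecOn with
  | nil => simp [PySem.Set.ofList_nil]
  | append_singleton rest x ih =>
    rw [PySem.Set.ofList_append_singleton, PySem.Set.add_eq_ite]
    by_cases hx : x ∈ PySem.Set.ofList rest
    · have hx' : x ∈ rest := (PySem.Set.mem_ofList _ _).mp hx
      rw [if_pos hx]
      have hle := PySem.Set.length_ofList_le (xs := rest)
      constructor
      · intro hlen
        exfalso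
        simp [List.length_append] at hlen
        omega
      · intro hnd
        rw [List.nodup_append] at hnd
        exact absurd rfl (hnd.2.2 x hx' x (List.mem_singleton_self x))
    · have hx' : x ∉ rest := fun hm => hx ((PySem.Set.mem_ofList _ _).mpr hm)
      rw [if_neg hx]
      simp only [List.length_append, List.length_cons, List.length_nil]
      rw [List.nodup_append]
      constructor
      · intro hlen
        refine ⟨ih.mp (by omega), List.nodup_singleton x, ?_⟩
        intro a ha b hb
        rw [List.mem_singleton] at hb
        subst hb
        exact fun he => hx' (he ▸ ha)
      · intro ⟨hnd, _, _⟩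
        have := ih.mpr hnd
        omega

-- ===== VERDICT (by name: the statement is the Claim_ definition above) =====
theorem differentNames_spec : Claim_equal_differentNames := by
  unfold Claim_equal_differentNames
  intro names flag _
  unfold Spec_differentNames differentNames differentNames_alt
  -- A's dict is Counter(names)
  have h1 : (differentNamesLoop names PySem.Dict.empty flag).1 = PySem.Dict.counter names := by
    rw [loop_fst, PySem.Dict.foldl_insert_getD_add_one_eq_counter]
  have h2 := loop_snd names PySem.Dict.empty flag (by simp [PySem.Dict.keys_empty])
  -- B's dict fold over the deduped keys appends fresh items
  have hfresh : ∀ a ∈ PySem.List.dedup names, (PySem.Dict.empty : PySem.Dict String Int).contains a = false := by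
    intro a _; simp [PySem.Dict.contains_empty]
  have hB : ((PySem.List.dedup names).foldl
      (fun d n => d.insert n ((names.count n : Int))) PySem.Dict.empty).items
      = (PySem.List.dedup names).map (fun k => (k, (names.count k : Int))) := by
    have h := PySem.Dict.items_foldl_insert_fresh (PySem.List.dedup names) id
      (fun n => (names.count n : Int)) PySem.Dict.empty hfresh
      (by simp)
    simpa [PySem.Dict.empty] using h
  rw [PySem.List.dedup_eq_ofList] at hB
  refine Prod.ext ?_ ?_
  · simp only [h1, PySem.Dict.items_counter, PySem.List.dedup_eq_ofList]
    exact hB.symm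
  · simp only [h2, PySem.Dict.keys_empty, List.nil_append, PySem.List.dedup_eq_ofList]
    have hle := PySem.Set.length_ofList_le (xs := names)
    by_cases hnd : names.Nodup
    · have : (PySem.Set.ofList names).length = names.length := (length_ofList_eq_iff names).mpr hnd
      simp [this, hnd]
    · have hne : (PySem.Set.ofList names).length ≠ names.length :=
        fun h => hnd ((length_ofList_eq_iff names).mp h)
      have hlt : (PySem.Set.ofList names).length < names.length := lt_of_le_of_ne hle hne
      simp [hlt, hnd]
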